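-- pv_equiv track=rewrite | github.com/JJaakson/School-Work | Python MainCourse/pr07_pyramid/pyramid.py | join_pyramids
-- ===== SOURCE A (Python) =====
-- def join_pyramids(pyramid_a: list, pyramid_b: list) -> list:
--     """
--     Join together two pyramid lists.
--
--     Get 2 pyramid lists as inputs. Join them together horizontally. If the the pyramid heights are not equal, add empty lines on the top until they are equal.
--     join_pyramids(make_pyramid(3, "A"), make_pyramid(6, 'a')) ->
--     [
--         [' ', ' ', ' ', ' ', ' ', 'a', 'a', ' ', ' '],
--         [' ', 'A', ' ', ' ', 'a', 'a', 'a', 'a', ' '],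
--         ['A', 'A', 'A', 'a', 'a', 'a', 'a', 'a', 'a']
--     ]
--
--     :param pyramid_a: list
--     :param pyramid_b: list
--     :return: list
--     """
--     a = len(pyramid_a)
--     b = len(pyramid_b)
--     pyramid_a = pyramid_a[::-1]  # Reveses the list
--     pyramid_b = pyramid_b[::-1]
--     if a < b:  # checks which list needs the "empty line"
--         new_list_a = [" " for _ in range(len(pyramid_a[0]))]  # makes an empty list that is the correct length
--         better_list = [pyramid_a[i] + pyramid_b[i] if i < a else new_list_a + pyramid_b[i] for i in range(b)]
--         #  adds up the lists
--     elif b < a: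
--         new_list_b = [" " for _ in range(len(pyramid_b[0]))]
--         better_list = [pyramid_a[i] + pyramid_b[i] if i < b else pyramid_a[i] + new_list_b for i in range(a)]
--     else:
--         better_list = [pyramid_a[i] + pyramid_b[i] for i in range(b)]
--     return better_list[::-1]
-- ===== SOURCE B (Python) =====
-- def join_pyramids(pyramid_a: list, pyramid_b: list) -> list:
--     """Recursive co-traversal: emit blank-extended rows while the taller pyramid
--     has extra height, then merge aligned rows, without building any padded list."""
--     if len(pyramid_a) < len(pyramid_b):
--         blank_a = [" "] * len(pyramid_a[-1])
--     else:
--         blank_a = []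
--     if len(pyramid_b) < len(pyramid_a):
--         blank_b = [" "] * len(pyramid_b[-1])
--     else:
--         blank_b = []
--
--     def rec(xs, ys):
--         if not xs and not ys:
--             return []
--         if len(xs) < len(ys):
--             return [blank_a + ys[0]] + rec(xs, ys[1:])
--         if len(ys) < len(xs):
--             return [xs[0] + blank_b] + rec(xs[1:], ys)
--         return [xs[0] + ys[0]] + rec(xs[1:], ys[1:])
--
--     return rec(pyramid_a, pyramid_b)
-- ===== Notes on version B (the rewrite author's own statement) =====
-- stated objective: alternative
-- what changed: A reverses both lists, merges bottom-up with an index-conditional comprehension over range(max) and reverses back; B never reverses or pads: a recursive co-traversal of the two row lists compares remaining heights at each step, emitting a blank-extended row while one pyramid still has extra height and merging aligned rows otherwise.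
import Mathlib
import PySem

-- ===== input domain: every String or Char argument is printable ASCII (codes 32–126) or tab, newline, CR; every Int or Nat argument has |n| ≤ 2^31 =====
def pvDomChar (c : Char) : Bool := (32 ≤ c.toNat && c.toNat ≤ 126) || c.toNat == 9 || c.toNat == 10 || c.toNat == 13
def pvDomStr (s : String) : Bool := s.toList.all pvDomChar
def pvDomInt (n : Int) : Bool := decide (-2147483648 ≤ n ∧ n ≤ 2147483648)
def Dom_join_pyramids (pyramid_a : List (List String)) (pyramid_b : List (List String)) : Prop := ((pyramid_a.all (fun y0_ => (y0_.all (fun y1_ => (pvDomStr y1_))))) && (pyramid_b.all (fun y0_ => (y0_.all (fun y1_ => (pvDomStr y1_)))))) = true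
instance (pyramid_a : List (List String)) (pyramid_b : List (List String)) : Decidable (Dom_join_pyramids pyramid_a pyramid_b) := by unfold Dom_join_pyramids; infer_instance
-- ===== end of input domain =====

-- B replaces A's reverse → branch-in-comprehension → reverse with a recursive co-traversal
-- of the two row lists that compares remaining heights at each step (objective: alternative).


-- ===== PORT A =====
-- pyramid_x[::-1] is ported as List.reverse; PySem.List.pyGetD with default [] stands for
-- Python's pyramid[i] — the only index that can be out of range, pyramid[0] of an empty
-- shorter pyramid (Python: IndexError), is excluded by Pre_join_pyramids.
def join_pyramids (pyramid_a : List (List String)) (pyramid_b : List (List String)) : List (List String) :=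
  let a := pyramid_a.length
  let b := pyramid_b.length
  let pa := pyramid_a.reverse
  let pb := pyramid_b.reverse
  let better_list :=
    if a < b then
      let new_list_a := (PySem.List.pyRange 0 ((PySem.List.pyGetD pa 0 []).length : Int)).map (fun _ => " ")
      (PySem.List.pyRange 0 (b : Int)).map (fun i =>
        if i < (a : Int) then PySem.List.pyGetD pa i [] ++ PySem.List.pyGetD pb i []
        else new_list_a ++ PySem.List.pyGetD pb i [])
    else if b < a then
      let new_list_b := (PySem.List.pyRange 0 ((PySem.List.pyGetD pb 0 []).length : Int)).map (fun _ => " ")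
      (PySem.List.pyRange 0 (a : Int)).map (fun i =>
        if i < (b : Int) then PySem.List.pyGetD pa i [] ++ PySem.List.pyGetD pb i []
        else PySem.List.pyGetD pa i [] ++ new_list_b)
    else
      (PySem.List.pyRange 0 (b : Int)).map (fun i =>
        PySem.List.pyGetD pa i [] ++ PySem.List.pyGetD pb i [])
  better_list.reverse

-- ===== PORT B =====
-- rows[-1] is ported as PySem.List.pyGetD rows (-1) [] (IndexError on an empty shorter
-- pyramid, excluded by Pre_join_pyramids); the inner Python function rec becomes jp_rec,
-- recursion on the two lists with headD/tail for ys[0]/ys[1:].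
def jp_rec (blank_a blank_b : List String) (xs ys : List (List String)) : List (List String) :=
  if xs = [] ∧ ys = [] then []
  else if xs.length < ys.length then (blank_a ++ ys.headD []) :: jp_rec blank_a blank_b xs ys.tail
  else if ys.length < xs.length then (xs.headD [] ++ blank_b) :: jp_rec blank_a blank_b xs.tail ys
  else (xs.headD [] ++ ys.headD []) :: jp_rec blank_a blank_b xs.tail ys.tail
termination_by xs.length + ys.length
decreasing_by
  · simp only [List.length_tail]; omega
  · simp only [List.length_tail]; omega
  · simp only [List.length_tail]
    rcases xs with _ | ⟨x, xs⟩
    · rcases ys with _ | ⟨y, ys⟩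
      · simp_all
      · simp_all
    · simp; omega

def join_pyramids_alt (pyramid_a : List (List String)) (pyramid_b : List (List String)) : List (List String) :=
  let blank_a := if pyramid_a.length < pyramid_b.length
    then List.replicate (PySem.List.pyGetD pyramid_a (-1) []).length " " else []
  let blank_b := if pyramid_b.length < pyramid_a.length
    then List.replicate (PySem.List.pyGetD pyramid_b (-1) []).length " " else []
  jp_rec blank_a blank_b pyramid_a pyramid_b

-- ===== PRECONDITION & SPEC =====
-- Pre_ excludes exactly the inputs where Python A raises IndexError (and Python B raises
-- the same IndexError): one pyramid empty and the other not, where the shorter pyramid's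
-- widest row is indexed.
def Pre_join_pyramids (pyramid_a : List (List String)) (pyramid_b : List (List String)) : Prop :=
  pyramid_a = [] ↔ pyramid_b = []
instance (pyramid_a : List (List String)) (pyramid_b : List (List String)) : Decidable (Pre_join_pyramids pyramid_a pyramid_b) := by unfold Pre_join_pyramids; infer_instance

def pvWitness_join_pyramids : List (List String) × List (List String) :=
  ([["A"]], [["a"], ["a", "a", "a"]])

def Spec_join_pyramids (pyramid_a : List (List String)) (pyramid_b : List (List String)) (out : List (List String)) : Prop := out = join_pyramids_alt pyramid_a pyramid_b
instance (pyramid_a : List (List String)) (pyramid_b : List (List String)) (out : List (List String)) : Decidable (Spec_join_pyramids pyramid_a pyramid_b out) := by unfold Spec_join_pyramids; infer_instance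

-- ===== CLAIM (what is proved, stated in full; the proofs are below) =====
def Claim_equal_join_pyramids : Prop := ∀ (pyramid_a : List (List String)) (pyramid_b : List (List String)), Dom_join_pyramids pyramid_a pyramid_b → Pre_join_pyramids pyramid_a pyramid_b → Spec_join_pyramids pyramid_a pyramid_b (join_pyramids pyramid_a pyramid_b)

-- ===== LEMMAS AND PROOFS =====

-- Python's xs[-1] on a nonempty list is the 0th element of the reversed list.
theorem pyGetD_neg_one_eq_rev_zero (xs : List (List String)) (h : xs ≠ []) :
    PySem.List.pyGetD xs (-1) [] = xs.reverse.getD 0 [] := by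
  have hl : 0 < xs.length := List.length_pos_iff.mpr h
  have h0 : 0 < xs.reverse.length := by simpa using hl
  rw [List.getD_eq_getElem _ _ h0, List.getElem_reverse]
  simp only [PySem.List.pyGetD, PySem.List.pyGet?, PySem.List.pyIdx?]
  rw [if_neg (by omega), if_pos (by omega)]
  simp only [Option.bind_some]
  rw [List.getElem?_eq_getElem (by omega)]
  simp

-- jp_rec on equal-height lists is a plain row-wise zip.
theorem jp_rec_eq (ba bb : List String) (xs ys : List (List String))
    (h : xs.length = ys.length) :
    jp_rec ba bb xs ys = List.zipWith (fun ra rb => ra ++ rb) xs ys := by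
  induction xs generalizing ys with
  | nil =>
    have : ys = [] := by simpa using h.symm
    subst this
    simp [jp_rec]
  | cons x xs ih =>
    rcases ys with _ | ⟨y, ys⟩
    · simp at h
    · rw [jp_rec]
      simp only [List.length_cons] at h
      rw [if_neg (by simp), if_neg (by simp; omega), if_neg (by simp; omega)]
      simp only [List.headD_cons, List.tail_cons, List.zipWith_cons_cons]
      exact congrArg _ (ih ys (by omega))

-- jp_rec when xs is shorter: the pad-then-zip characterisation.
theorem jp_rec_lt (ba bb : List String) (xs ys : List (List String))
    (h : xs.length < ys.length) :
    jp_rec ba bb xs ys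
      = List.zipWith (fun ra rb => ra ++ rb)
          (List.replicate (ys.length - xs.length) ba ++ xs) ys := by
  induction ys generalizing xs with
  | nil => simp at h
  | cons y ys ih =>
    rw [jp_rec, if_neg (by simp), if_pos h]
    simp only [List.length_cons] at h ⊢
    have hrep : ys.length + 1 - xs.length = (ys.length - xs.length) + 1 := by omega
    rw [hrep, List.replicate_succ, List.cons_append, List.zipWith_cons_cons]
    simp only [List.headD_cons, List.tail_cons]
    rcases Nat.lt_or_ge xs.length ys.length with hlt | hge
    · exact congrArg _ (ih xs hlt)
    · have heq : xs.length = ys.length := by omega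
      rw [jp_rec_eq ba bb xs ys heq]
      have : ys.length - xs.length = 0 := by omega
      rw [this, List.replicate_zero, List.nil_append]

-- jp_rec when ys is shorter.
theorem jp_rec_gt (ba bb : List String) (xs ys : List (List String))
    (h : ys.length < xs.length) :
    jp_rec ba bb xs ys
      = List.zipWith (fun ra rb => ra ++ rb)
          xs (List.replicate (xs.length - ys.length) bb ++ ys) := by
  induction xs generalizing ys with
  | nil => simp at h
  | cons x xs ih =>
    simp only [List.length_cons] at h
    rw [jp_rec, if_neg (by simp), if_neg (by simp only [List.length_cons]; omega),
        if_pos (by simp only [List.length_cons]; omega)]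
    simp only [List.length_cons] at ⊢
    have hrep : xs.length + 1 - ys.length = (xs.length - ys.length) + 1 := by omega
    rw [hrep, List.replicate_succ, List.cons_append, List.zipWith_cons_cons]
    simp only [List.headD_cons, List.tail_cons]
    rcases Nat.lt_or_ge ys.length xs.length with hlt | hge
    · exact congrArg _ (ih ys hlt)
    · have heq : xs.length = ys.length := by omega
      rw [jp_rec_eq ba bb xs ys heq]
      have : xs.length - ys.length = 0 := by omega
      rw [this, List.replicate_zero, List.nil_append]

-- A's merged list in the a < b branch, with plain getD, equals pad-then-zip.
theorem merge_lt (pa pb : List (List String)) (blank : List String)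
    (h : pa.length < pb.length) :
    ((List.range pb.length).map (fun j =>
        if j < pa.length then pa.reverse.getD j [] ++ pb.reverse.getD j []
        else blank ++ pb.reverse.getD j [])).reverse
      = List.zipWith (fun ra rb => ra ++ rb)
          (List.replicate (pb.length - pa.length) blank ++ pa) pb := by
  apply List.ext_getElem
  · simp; omega
  · intro i h1 h2
    rw [List.getElem_reverse]
    simp only [List.length_map, List.length_range] at h1 ⊢
    simp only [List.getElem_map, List.getElem_range, List.getElem_zipWith]
    have hib : i < pb.length := by
      simp only [List.length_reverse, List.length_map, List.length_range] at h1
      omega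
    have hrevb : pb.length - 1 - i < pb.reverse.length := by simp; omega
    by_cases hc : i < pb.length - pa.length
    · rw [if_neg (by omega)]
      rw [List.getElem_append_left (by simp; omega), List.getElem_replicate]
      rw [List.getD_eq_getElem _ _ hrevb, List.getElem_reverse]
      have e : pb.length - 1 - (pb.length - 1 - i) = i := by omega
      simp only [e]
    · rw [if_pos (by omega)]
      rw [List.getElem_append_right (by simp; omega)]
      have hreva : pb.length - 1 - i < pa.reverse.length := by simp; omega
      rw [List.getD_eq_getElem _ _ hreva, List.getElem_reverse,
          List.getD_eq_getElem _ _ hrevb, List.getElem_reverse]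
      have e1 : pa.length - 1 - (pb.length - 1 - i) = i - (List.replicate (pb.length - pa.length) blank).length := by
        simp; omega
      have e2 : pb.length - 1 - (pb.length - 1 - i) = i := by omega
      simp only [e1, e2]

-- A's merged list in the b < a branch.
theorem merge_gt (pa pb : List (List String)) (blank : List String)
    (h : pb.length < pa.length) :
    ((List.range pa.length).map (fun j =>
        if j < pb.length then pa.reverse.getD j [] ++ pb.reverse.getD j []
        else pa.reverse.getD j [] ++ blank)).reverse
      = List.zipWith (fun ra rb => ra ++ rb)
          pa (List.replicate (pa.length - pb.length) blank ++ pb) := by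
  apply List.ext_getElem
  · simp; omega
  · intro i h1 h2
    rw [List.getElem_reverse]
    simp only [List.length_map, List.length_range] at h1 ⊢
    simp only [List.getElem_map, List.getElem_range, List.getElem_zipWith]
    have hia : i < pa.length := by
      simp only [List.length_reverse, List.length_map, List.length_range] at h1
      omega
    have hreva : pa.length - 1 - i < pa.reverse.length := by simp; omega
    rw [List.getD_eq_getElem _ _ hreva, List.getElem_reverse]
    have ea : pa.length - 1 - (pa.length - 1 - i) = i := by omega
    simp only [ea]
    by_cases hc : i < pa.length - pb.length
    · rw [if_neg (by omega)]
      rw [List.getElem_append_left (by simp; omega), List.getElem_replicate]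
    · rw [if_pos (by omega)]
      rw [List.getElem_append_right (by simp; omega)]
      have hrevb : pa.length - 1 - i < pb.reverse.length := by simp; omega
      rw [List.getD_eq_getElem _ _ hrevb, List.getElem_reverse]
      have eb : pb.length - 1 - (pa.length - 1 - i) = i - (List.replicate (pa.length - pb.length) blank).length := by
        simp; omega
      simp only [eb]

-- A's merged list in the equal-heights branch.
theorem merge_eq (pa pb : List (List String)) (h : pa.length = pb.length) :
    ((List.range pb.length).map (fun j =>
        pa.reverse.getD j [] ++ pb.reverse.getD j [])).reverse
      = List.zipWith (fun ra rb => ra ++ rb) pa pb := by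
  apply List.ext_getElem
  · simp; omega
  · intro i h1 h2
    rw [List.getElem_reverse]
    simp only [List.length_map, List.length_range] at h1 ⊢
    simp only [List.getElem_map, List.getElem_range, List.getElem_zipWith]
    have hib : i < pb.length := by
      simp only [List.length_reverse, List.length_map, List.length_range] at h1
      omega
    have hrevb : pb.length - 1 - i < pb.reverse.length := by simp; omega
    have hreva : pb.length - 1 - i < pa.reverse.length := by simp; omega
    rw [List.getD_eq_getElem _ _ hreva, List.getElem_reverse,
        List.getD_eq_getElem _ _ hrevb, List.getElem_reverse]
    have ea : pa.length - 1 - (pb.length - 1 - i) = i := by omega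
    have eb : pb.length - 1 - (pb.length - 1 - i) = i := by omega
    simp only [ea, eb]

-- ===== VERDICT (by name: the statement is the Claim_ definition above) =====
theorem join_pyramids_spec : Claim_equal_join_pyramids := by
  intro pa pb _ hpre
  unfold Spec_join_pyramids
  unfold Pre_join_pyramids at hpre
  rcases Nat.lt_trichotomy pa.length pb.length with hlt | heq | hgt
  · have hbne : pb ≠ [] := by intro hb; rw [hb] at hlt; simp at hlt
    have hane : pa ≠ [] := fun ha => hbne (hpre.mp ha)
    simp only [join_pyramids, join_pyramids_alt, if_pos hlt,
      if_neg (show ¬ pb.length < pa.length by omega),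
      PySem.List.pyRange_zero_natCast, List.map_map, Function.comp_def,
      PySem.List.pyGetD_natCast, PySem.List.pyGetD_ofNat', Nat.cast_lt,
      List.map_const', List.length_range]
    rw [jp_rec_lt _ _ _ _ hlt, pyGetD_neg_one_eq_rev_zero pa hane]
    exact merge_lt pa pb _ hlt
  · simp only [join_pyramids, join_pyramids_alt,
      if_neg (show ¬ pa.length < pb.length by omega),
      if_neg (show ¬ pb.length < pa.length by omega),
      PySem.List.pyRange_zero_natCast, List.map_map, Function.comp_def,
      PySem.List.pyGetD_natCast]
    rw [jp_rec_eq _ _ _ _ heq]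
    exact merge_eq pa pb heq
  · have hane : pa ≠ [] := by intro ha; rw [ha] at hgt; simp at hgt
    have hbne : pb ≠ [] := fun hb => hane (hpre.mpr hb)
    simp only [join_pyramids, join_pyramids_alt,
      if_neg (show ¬ pa.length < pb.length by omega), if_pos hgt,
      PySem.List.pyRange_zero_natCast, List.map_map, Function.comp_def,
      PySem.List.pyGetD_natCast, PySem.List.pyGetD_ofNat', Nat.cast_lt,
      List.map_const', List.length_range]
    rw [jp_rec_gt _ _ _ _ hgt, pyGetD_neg_one_eq_rev_zero pb hbne]
    exact merge_gt pa pb _ hgt
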